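-- pv_equiv track=rewrite | github.com/JohnNDvorak/przz-extension | src/przz_iterm_monomial_evaluator.py | expand_psi_to_monomials
-- ===== SOURCE A (Python) =====
-- from typing import Tuple, List, Dict
-- from math import exp, log, comb, factorial
--
-- def expand_psi_to_monomials(ell: int, ellbar: int) -> Dict[Tuple[int,int,int,int], int]:
--     """
--     Expand Ψ_{ℓ,ℓ̄} to monomials with combined coefficients.
--
--     Returns dict mapping (i, j, k, m) -> coefficient.
--     """
--     combined = {}
--     max_p = min(ell, ellbar)
--
--     for p in range(max_p + 1):
--         psi_coeff = comb(ell, p) * comb(ellbar, p) * factorial(p)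
--         x_power = ell - p
--         y_power = ellbar - p
--         z_power = p
--
--         # Expand X^{x_power} × Y^{y_power} × Z^{z_power}
--         for a in range(x_power + 1):
--             x_coeff = comb(x_power, a) * ((-1) ** (x_power - a))
--             c_from_x = x_power - a
--
--             for b in range(y_power + 1):
--                 y_coeff = comb(y_power, b) * ((-1) ** (y_power - b))
--                 c_from_y = y_power - b
--
--                 for d in range(z_power + 1):
--                     z_coeff = comb(z_power, d) * ((-1) ** (z_power - d))
--                     c_from_z = 2 * (z_power - d)
--
--                     total_coeff = psi_coeff * x_coeff * y_coeff * z_coeff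
--                     total_c = c_from_x + c_from_y + c_from_z
--
--                     key = (a, b, total_c, d)
--                     combined[key] = combined.get(key, 0) + int(total_coeff)
--
--     # Remove zero coefficients
--     return {k: v for k, v in combined.items() if v != 0}
-- ===== SOURCE B (Python) =====
-- from math import comb, factorial
--
-- def expand_psi_to_monomials(ell: int, ellbar: int):
--     """Direct per-monomial summation: the exponent total_c is determined by
--     (a, b, d) as ell+ellbar-a-b-2*d, so keys never collide; each coefficient
--     is one explicit sum over p, and the output is built once in final order
--     (keys ordered by d, then a, then b, matching first-insertion order)."""
--     out = {}
--     top = min(ell, ellbar)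
--     for d in range(top + 1):
--         for a in range(ell - d + 1):
--             for b in range(ellbar - d + 1):
--                 hi = min(ell - a, ellbar - b, top)
--                 coeff = 0
--                 for p in range(d, hi + 1):
--                     sign = -1 if (ell + ellbar - p - a - b - d) % 2 else 1
--                     coeff += (sign * comb(ell, p) * comb(ellbar, p) * factorial(p)
--                               * comb(ell - p, a) * comb(ellbar - p, b) * comb(p, d))
--                 if coeff != 0:
--                     out[(a, b, ell + ellbar - a - b - 2 * d, d)] = coeff
--     return out
-- ===== Notes on version B (the rewrite author's own statement) =====
-- stated objective: alternative
-- what changed: B eliminates the accumulation dict entirely: since the exponent total_c is determined by (a,b,d) as ell+ellbar-a-b-2d, keys never collide, so B loops over output keys (d,a,b) in final insertion order and computes each coefficient directly as one explicit sum over p, emitting nonzero entries once.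
import Mathlib
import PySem

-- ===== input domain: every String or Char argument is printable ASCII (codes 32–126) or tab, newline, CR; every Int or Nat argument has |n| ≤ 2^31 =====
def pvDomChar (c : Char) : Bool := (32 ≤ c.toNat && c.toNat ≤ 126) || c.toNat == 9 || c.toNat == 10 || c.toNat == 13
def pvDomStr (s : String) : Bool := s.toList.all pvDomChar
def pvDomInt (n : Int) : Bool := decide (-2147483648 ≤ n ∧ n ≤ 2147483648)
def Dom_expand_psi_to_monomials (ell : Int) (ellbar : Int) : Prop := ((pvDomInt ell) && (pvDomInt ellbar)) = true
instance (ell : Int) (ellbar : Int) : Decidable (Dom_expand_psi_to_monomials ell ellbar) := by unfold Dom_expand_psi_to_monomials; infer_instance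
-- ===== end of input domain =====

-- B drops A's accumulation dict: the exponent total_c is determined by (a,b,d), so B
-- enumerates each output key once (in A's first-insertion order) and computes its
-- coefficient as one explicit sum over p (objective: alternative); returns proved equal.

-- ===== PORT A =====
-- math.comb / math.factorial / (-1)**e — shared library helpers; exact on the
-- nonnegative arguments both programs reach (Python comb/factorial would raise on
-- negatives, and ** would produce a float for e < 0; neither occurs here).
def negOnePow (e : Int) : Int := (-1 : Int) ^ e.toNat
def pyComb (n k : Int) : Int := (n.toNat.choose k.toNat : Int)
def pyFact (n : Int) : Int := (n.toNat.factorial : Int)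

-- final dict comprehension {k: v for k, v in combined.items() if v != 0}
def pvDropZeros (combined : PySem.Dict (Int × Int × Int × Int) Int) :
    PySem.Dict (Int × Int × Int × Int) Int :=
  combined.items.foldl (fun acc kv => if kv.2 ≠ 0 then acc.insert kv.1 kv.2 else acc) PySem.Dict.empty

def expand_psi_to_monomials (ell : Int) (ellbar : Int) : List (Int × Int × Int × Int × Int) :=
  let max_p := min ell ellbar
  let combined : PySem.Dict (Int × Int × Int × Int) Int :=
    (PySem.List.pyRange 0 (max_p + 1) 1).foldl (fun dict0 p =>
      let psi_coeff := pyComb ell p * pyComb ellbar p * pyFact p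
      let x_power := ell - p
      let y_power := ellbar - p
      let z_power := p
      (PySem.List.pyRange 0 (x_power + 1) 1).foldl (fun dict1 a =>
        let x_coeff := pyComb x_power a * negOnePow (x_power - a)
        let c_from_x := x_power - a
        (PySem.List.pyRange 0 (y_power + 1) 1).foldl (fun dict2 b =>
          let y_coeff := pyComb y_power b * negOnePow (y_power - b)
          let c_from_y := y_power - b
          (PySem.List.pyRange 0 (z_power + 1) 1).foldl (fun dict3 d =>
            let z_coeff := pyComb z_power d * negOnePow (z_power - d)
            let c_from_z := 2 * (z_power - d)
            let total_coeff := psi_coeff * x_coeff * y_coeff * z_coeff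
            let total_c := c_from_x + c_from_y + c_from_z
            let key := (a, b, total_c, d)
            dict3.insert key (dict3.getD key 0 + total_coeff)) dict2) dict1) dict0)
      PySem.Dict.empty
  (pvDropZeros combined).items.map (fun kv => (kv.1.1, kv.1.2.1, kv.1.2.2.1, kv.1.2.2.2, kv.2))

-- ===== PORT B =====
def expand_psi_to_monomials_alt (ell : Int) (ellbar : Int) : List (Int × Int × Int × Int × Int) :=
  let top := min ell ellbar
  let out : PySem.Dict (Int × Int × Int × Int) Int :=
    (PySem.List.pyRange 0 (top + 1) 1).foldl (fun dict0 d =>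
      (PySem.List.pyRange 0 (ell - d + 1) 1).foldl (fun dict1 a =>
        (PySem.List.pyRange 0 (ellbar - d + 1) 1).foldl (fun dict2 b =>
          let hi := min (min (ell - a) (ellbar - b)) top
          let coeff := (PySem.List.pyRange d (hi + 1) 1).foldl (fun acc p =>
            acc + (if PySem.Int.mod (ell + ellbar - p - a - b - d) 2 ≠ 0 then (-1 : Int) else 1) *
              pyComb ell p * pyComb ellbar p * pyFact p *
              pyComb (ell - p) a * pyComb (ellbar - p) b * pyComb p d) 0
          if coeff ≠ 0 then dict2.insert (a, b, ell + ellbar - a - b - 2 * d, d) coeff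
          else dict2) dict1) dict0)
      PySem.Dict.empty
  out.items.map (fun kv => (kv.1.1, kv.1.2.1, kv.1.2.2.1, kv.1.2.2.2, kv.2))

-- ===== PRECONDITION & SPEC =====
def Spec_expand_psi_to_monomials (ell : Int) (ellbar : Int) (out : List (Int × Int × Int × Int × Int)) : Prop := out = expand_psi_to_monomials_alt ell ellbar
instance (ell : Int) (ellbar : Int) (out : List (Int × Int × Int × Int × Int)) : Decidable (Spec_expand_psi_to_monomials ell ellbar out) := by unfold Spec_expand_psi_to_monomials; infer_instance

-- ===== CLAIM (what is proved, stated in full; the proofs are below) =====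
def Claim_equal_expand_psi_to_monomials : Prop := ∀ (ell : Int) (ellbar : Int), Dom_expand_psi_to_monomials ell ellbar → Spec_expand_psi_to_monomials ell ellbar (expand_psi_to_monomials ell ellbar)

-- ===== LEMMAS AND PROOFS =====



theorem pv_sum_flatMap {α : Type} (l : List α) (f : α → List Int) :
    (l.flatMap f).sum = (l.map (fun x => (f x).sum)).sum := by
  induction l with
  | nil => rfl
  | cons x xs ih => simp [List.flatMap_cons, List.sum_append, ih]

theorem pv_sum_filter {α : Type} (l : List α) (p : α → Bool) (f : α → Int) :
    ((l.filter p).map f).sum = (l.map (fun x => if p x then f x else 0)).sum := by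
  induction l with
  | nil => rfl
  | cons x xs ih =>
    by_cases h : p x <;> simp [h, ih]

theorem pv_sum_single_aux (n : Nat) : ∀ (lo v : Int) (g : Int → Int),
    ((PySem.List.pyRange lo (lo + n) 1).map (fun x => if x = v then g x else 0)).sum
      = if lo ≤ v ∧ v < lo + n then g v else 0 := by
  induction n with
  | zero =>
    intro lo v g
    rw [PySem.List.pyRange_one_eq_nil (by omega)]
    simp
  | succ n ih =>
    intro lo v g
    rw [PySem.List.pyRange_one_cons (by omega)]
    have h : lo + 1 + (n : Int) = lo + (n + 1 : Nat) := by push_cast; ring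
    rw [List.map_cons, List.sum_cons, ← h, ih (lo + 1) v g]
    by_cases hv : lo = v
    · subst hv
      have h2 : ¬ (lo + 1 ≤ lo ∧ lo < lo + 1 + n) := by omega
      have h3 : lo ≤ lo ∧ lo < lo + 1 + n := by omega
      rw [if_pos rfl, if_neg h2, if_pos h3]
      ring
    · rw [if_neg hv]
      split_ifs with h1 h2 h3 <;> first | exact zero_add _ | omega

theorem pv_sum_single (lo hi v : Int) (g : Int → Int) :
    ((PySem.List.pyRange lo hi 1).map (fun x => if x = v then g x else 0)).sum
      = if lo ≤ v ∧ v < hi then g v else 0 := by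
  by_cases h : lo ≤ hi
  · have h2 : hi = lo + ((hi - lo).toNat : Int) := by omega
    rw [h2, pv_sum_single_aux]
  · rw [PySem.List.pyRange_one_eq_nil (by omega)]
    simp
    omega

theorem pv_negOnePow_mul (x y : Int) (hx : 0 ≤ x) (hy : 0 ≤ y) :
    negOnePow x * negOnePow y = negOnePow (x + y) := by
  unfold negOnePow
  rw [← pow_add]
  congr 1
  omega

theorem pv_negOnePow_mod (x : Int) (hx : 0 ≤ x) :
    negOnePow x = if PySem.Int.mod x 2 ≠ 0 then (-1 : Int) else 1 := by
  unfold negOnePow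
  rw [PySem.Int.mod_eq_emod_of_pos (show (0:Int) < 2 by norm_num)]
  rcases Int.emod_two_eq x with h | h
  · rw [Even.neg_one_pow (Nat.even_iff.mpr (by omega))]
    simp [h]
  · rw [Odd.neg_one_pow (Nat.odd_iff.mpr (by omega))]
    simp [h]

theorem pv_getD_foldIns (U : List ((Int × Int × Int × Int) × Int)) :
    ∀ (dict : PySem.Dict (Int × Int × Int × Int) Int) (k : Int × Int × Int × Int),
    (U.foldl (fun dict kc => dict.insert kc.1 (dict.getD kc.1 0 + kc.2)) dict).getD k 0
      = dict.getD k 0 + ((U.filter (fun kc => kc.1 == k)).map (·.2)).sum := by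
  induction U with
  | nil => intro dict k; simp
  | cons kc U ih =>
    intro dict k
    rw [List.foldl_cons, ih]
    by_cases h : kc.1 = k
    · subst h
      rw [List.filter_cons_of_pos (by simp), List.map_cons, List.sum_cons]
      rw [PySem.Dict.getD_insert_self]
      ring
    · rw [List.filter_cons_of_neg (by simpa using h)]
      rw [PySem.Dict.getD_insert_of_ne _ _ _ (Ne.symm h)]

theorem pv_items_foldIf (l : List ((Int × Int × Int × Int) × Int)) :
    ∀ (d : PySem.Dict (Int × Int × Int × Int) Int),
    (l.map (·.1)).Nodup → (∀ kc ∈ l, d.contains kc.1 = false) →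
    (l.foldl (fun acc kv => if kv.2 ≠ 0 then acc.insert kv.1 kv.2 else acc) d).items
      = d.items ++ l.filter (fun kc => decide (kc.2 ≠ 0)) := by
  induction l with
  | nil => intro d _ _; simp
  | cons kc l ih =>
    intro d hnd hfresh
    rw [List.map_cons] at hnd
    have htail := hnd.of_cons
    have hhead : kc.1 ∉ l.map (·.1) := (List.nodup_cons.mp hnd).1
    rw [List.foldl_cons]
    by_cases h : kc.2 ≠ 0
    · rw [if_pos h, ih _ htail
        (by
          intro x hx
          rw [PySem.Dict.contains_insert, hfresh x (List.mem_cons_of_mem _ hx)]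
          simp only [Bool.or_false, beq_eq_false_iff_ne, ne_eq]
          intro e
          exact hhead (e ▸ List.mem_map_of_mem (f := (·.1)) hx)),
        PySem.Dict.items_insert_of_not_contains _ _ (hfresh kc (List.mem_cons_self)),
        List.filter_cons_of_pos (by simpa using h)]
      simp
    · rw [if_neg h, ih _ htail (fun x hx => hfresh x (List.mem_cons_of_mem _ hx)),
        List.filter_cons_of_neg (by simpa using h)]


def pvKey (ell ellbar a b d : Int) : Int × Int × Int × Int :=
  (a, b, ell + ellbar - a - b - 2 * d, d)

def pvTerm (ell ellbar p a b d : Int) : Int :=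
  pyComb ell p * pyComb ellbar p * pyFact p *
    (pyComb (ell - p) a * negOnePow (ell - p - a)) *
    (pyComb (ellbar - p) b * negOnePow (ellbar - p - b)) *
    (pyComb p d * negOnePow (p - d))

def pvUA (ell ellbar : Int) (n : Int) : List ((Int × Int × Int × Int) × Int) :=
  (PySem.List.pyRange 0 n 1).flatMap (fun p =>
    (PySem.List.pyRange 0 (ell - p + 1) 1).flatMap (fun a =>
      (PySem.List.pyRange 0 (ellbar - p + 1) 1).flatMap (fun b =>
        (PySem.List.pyRange 0 (p + 1) 1).map (fun d =>
          (pvKey ell ellbar a b d, pvTerm ell ellbar p a b d)))))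

def pvKeys (ell ellbar : Int) (n : Int) : List (Int × Int × Int × Int) :=
  (PySem.List.pyRange 0 n 1).flatMap (fun d =>
    (PySem.List.pyRange 0 (ell - d + 1) 1).flatMap (fun a =>
      (PySem.List.pyRange 0 (ellbar - d + 1) 1).map (fun b => pvKey ell ellbar a b d)))

theorem pv_key_eq_iff (ell ellbar a b d a' b' d' : Int) :
    pvKey ell ellbar a b d = pvKey ell ellbar a' b' d' ↔ (a = a' ∧ b = b' ∧ d = d') := by
  simp only [pvKey, Prod.mk.injEq]
  omega

theorem pv_mem_keys (ell ellbar n : Int) (y : Int × Int × Int × Int) :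
    y ∈ pvKeys ell ellbar n ↔ ∃ d a b, 0 ≤ d ∧ d < n ∧ 0 ≤ a ∧ a < ell - d + 1 ∧
      0 ≤ b ∧ b < ellbar - d + 1 ∧ y = pvKey ell ellbar a b d := by
  simp only [pvKeys, List.mem_flatMap, List.mem_map, PySem.List.mem_pyRange_one]
  constructor
  · rintro ⟨d, ⟨hd1, hd2⟩, a, ⟨ha1, ha2⟩, b, ⟨hb1, hb2⟩, hy⟩
    exact ⟨d, a, b, hd1, hd2, ha1, ha2, hb1, hb2, hy.symm⟩
  · rintro ⟨d, a, b, hd1, hd2, ha1, ha2, hb1, hb2, hy⟩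
    exact ⟨d, ⟨hd1, hd2⟩, a, ⟨ha1, ha2⟩, b, ⟨hb1, hb2⟩, hy.symm⟩

theorem pv_nodup_3 (l1 : List Int) (h1 : l1.Nodup) (A B : Int → Int)
    (K : Int → Int → Int → (Int × Int × Int × Int))
    (hinj : ∀ u u' v v' w w', K u v w = K u' v' w' → u = u' ∧ v = v' ∧ w = w') :
    (l1.flatMap (fun u => (PySem.List.pyRange 0 (A u) 1).flatMap (fun v =>
      (PySem.List.pyRange 0 (B u) 1).map (fun w => K u v w)))).Nodup := by
  rw [List.nodup_flatMap]
  refine ⟨fun u _ => ?_, ?_⟩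
  · rw [List.nodup_flatMap]
    refine ⟨fun v _ => ?_, ?_⟩
    · exact (PySem.List.nodup_pyRange_one _ _).map
        (fun w w' e => (hinj u u v v w w' e).2.2)
    · refine (PySem.List.nodup_pyRange_one _ _).imp ?_
      intro v v' hne x hx hx'
      simp only [List.mem_map] at hx hx'
      obtain ⟨w, _, hw⟩ := hx
      obtain ⟨w', _, hw'⟩ := hx'
      exact hne (hinj u u v v' w w' (hw.trans hw'.symm)).2.1
  · refine h1.imp ?_
    intro u u' hne x hx hx'
    simp only [List.mem_flatMap, List.mem_map] at hx hx'
    obtain ⟨v, _, w, _, hw⟩ := hx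
    obtain ⟨v', _, w', _, hw'⟩ := hx'
    exact hne (hinj u u' v v' w w' (hw.trans hw'.symm)).1

theorem pv_flatMap_congr {α β : Type} (l : List α) (f g : α → List β)
    (h : ∀ x ∈ l, f x = g x) : l.flatMap f = l.flatMap g := by
  induction l with
  | nil => rfl
  | cons x xs ih =>
    rw [List.flatMap_cons, List.flatMap_cons, h x (List.mem_cons_self),
      ih (fun y hy => h y (List.mem_cons_of_mem _ hy))]

theorem pv_keys_order (ell ellbar : Int) : ∀ (n : Nat),
    PySem.Set.ofList ((pvUA ell ellbar n).map (·.1)) = pvKeys ell ellbar n := by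
  intro n
  induction n with
  | zero =>
    simp [pvUA, pvKeys, PySem.List.pyRange_one_eq_nil (le_refl (0:Int))]
  | succ n ih =>
    have hn : (0:Int) ≤ (n:Int) := Int.natCast_nonneg n
    have hcast : ((n + 1 : Nat) : Int) = (n : Int) + 1 := by push_cast; ring
    have hr : PySem.List.pyRange 0 (((n+1 : Nat)):Int) 1
        = PySem.List.pyRange 0 ((n:Int)) 1 ++ [(n:Int)] := by
      rw [hcast]; exact PySem.List.pyRange_one_succ_right hn
    have hUA : pvUA ell ellbar ((n+1 : Nat)) = pvUA ell ellbar n ++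
        ((PySem.List.pyRange 0 (ell - n + 1) 1).flatMap (fun a =>
          (PySem.List.pyRange 0 (ellbar - n + 1) 1).flatMap (fun b =>
            (PySem.List.pyRange 0 ((n:Int) + 1) 1).map (fun d =>
              (pvKey ell ellbar a b d, pvTerm ell ellbar (n:Int) a b d))))) := by
      unfold pvUA
      rw [hr, List.flatMap_append, List.flatMap_cons, List.flatMap_nil, List.append_nil]
    have hKeys : pvKeys ell ellbar ((n+1 : Nat)) = pvKeys ell ellbar n ++
        ((PySem.List.pyRange 0 (ell - n + 1) 1).flatMap (fun a =>
          (PySem.List.pyRange 0 (ellbar - n + 1) 1).map (fun b => pvKey ell ellbar a b (n:Int)))) := by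
      unfold pvKeys
      rw [hr, List.flatMap_append, List.flatMap_cons, List.flatMap_nil, List.append_nil]
    rw [hUA, List.map_append, PySem.Set.ofList_append, ih,
      PySem.Set.update_eq_append_filter, hKeys]
    congr 1
    -- the appended block
    have hblock : ((PySem.List.pyRange 0 (ell - n + 1) 1).flatMap (fun a =>
          (PySem.List.pyRange 0 (ellbar - n + 1) 1).flatMap (fun b =>
            (PySem.List.pyRange 0 ((n:Int) + 1) 1).map (fun d =>
              (pvKey ell ellbar a b d, pvTerm ell ellbar (n:Int) a b d))))).map (·.1)
        = (PySem.List.pyRange 0 (ell - n + 1) 1).flatMap (fun a =>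
          (PySem.List.pyRange 0 (ellbar - n + 1) 1).flatMap (fun b =>
            (PySem.List.pyRange 0 ((n:Int) + 1) 1).map (fun d => pvKey ell ellbar a b d))) := by
      simp [List.map_flatMap, List.map_map, Function.comp_def]
    rw [hblock]
    have hnd : ((PySem.List.pyRange 0 (ell - n + 1) 1).flatMap (fun a =>
          (PySem.List.pyRange 0 (ellbar - n + 1) 1).flatMap (fun b =>
            (PySem.List.pyRange 0 ((n:Int) + 1) 1).map (fun d => pvKey ell ellbar a b d)))).Nodup :=
      pv_nodup_3 _ (PySem.List.nodup_pyRange_one _ _) _ _ _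
        (fun u u' v v' w w' e => (pv_key_eq_iff ell ellbar u v w u' v' w').mp e)
    rw [PySem.Set.ofList_eq_self_of_nodup _ hnd, List.filter_flatMap]
    apply pv_flatMap_congr
    intro a ha
    rw [List.filter_flatMap]
    have ha' : 0 ≤ a ∧ a < ell - n + 1 := (PySem.List.mem_pyRange_one.mp ha)
    have hpoint : ∀ b ∈ PySem.List.pyRange 0 (ellbar - n + 1) 1,
        ((PySem.List.pyRange 0 ((n:Int) + 1) 1).map (fun d => pvKey ell ellbar a b d)).filter
          (fun y => !(PySem.Set.contains (pvKeys ell ellbar n) y))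
        = [pvKey ell ellbar a b (n:Int)] := by
      intro b hb
      have hb' : 0 ≤ b ∧ b < ellbar - n + 1 := (PySem.List.mem_pyRange_one.mp hb)
      rw [List.filter_map, PySem.List.pyRange_one_succ_right hn, List.filter_append]
      have h1 : (PySem.List.pyRange 0 ((n:Int)) 1).filter
          ((fun y => !(PySem.Set.contains (pvKeys ell ellbar n) y)) ∘ (fun d => pvKey ell ellbar a b d)) = [] := by
        rw [List.filter_eq_nil_iff]
        intro d hd
        have hd' := PySem.List.mem_pyRange_one.mp hd
        simp only [Function.comp_apply, Bool.not_eq_true']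
        rw [Bool.not_eq_false]
        exact (PySem.Set.contains_iff _ _).mpr
          ((pv_mem_keys ell ellbar n _).mpr ⟨d, a, b, hd'.1, hd'.2, ha'.1, by omega, hb'.1, by omega, rfl⟩)
      have hnotmem : pvKey ell ellbar a b (n:Int) ∉ pvKeys ell ellbar n := by
        intro hmem
        obtain ⟨d', a', b', hd1, hd2, _, _, _, _, he⟩ := (pv_mem_keys ell ellbar n _).mp hmem
        have := (pv_key_eq_iff ell ellbar a b (n:Int) a' b' d').mp he
        omega
      have hc : PySem.Set.contains (pvKeys ell ellbar n) (pvKey ell ellbar a b (n:Int)) = false := by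
        rw [Bool.eq_false_iff]
        intro ht
        exact hnotmem ((PySem.Set.contains_iff _ _).mp ht)
      have h2 : ([(n:Int)]).filter
          ((fun y => !(PySem.Set.contains (pvKeys ell ellbar n) y)) ∘ (fun d => pvKey ell ellbar a b d)) = [(n:Int)] := by
        simp [Function.comp_def, hnotmem]
      rw [h1, h2, List.nil_append, List.map_cons, List.map_nil]
    rw [pv_flatMap_congr _ _ _ hpoint]
    exact List.map_eq_flatMap.symm

theorem pv_ite_and3 (p q r : Prop) [Decidable p] [Decidable q] [Decidable r] (t : Int) :
    (if p ∧ q ∧ r then t else 0) = if p then (if q then (if r then t else 0) else 0) else 0 := by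
  split_ifs <;> tauto

theorem pv_sum_ite_const (C : Prop) [Decidable C] (l : List Int) (f : Int → Int) :
    ((l.map (fun x => if C then f x else 0)).sum) = if C then (l.map f).sum else 0 := by
  by_cases h : C <;> simp [h]

theorem pv_term_eq (ell ellbar p a b d : Int) (h1 : 0 ≤ ell - p - a) (h2 : 0 ≤ ellbar - p - b)
    (h3 : 0 ≤ p - d) :
    pvTerm ell ellbar p a b d
      = (if PySem.Int.mod (ell + ellbar - p - a - b - d) 2 ≠ 0 then (-1 : Int) else 1) *
        pyComb ell p * pyComb ellbar p * pyFact p *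
        pyComb (ell - p) a * pyComb (ellbar - p) b * pyComb p d := by
  unfold pvTerm
  have hs : negOnePow (ell - p - a) * negOnePow (ellbar - p - b) * negOnePow (p - d)
      = (if PySem.Int.mod (ell + ellbar - p - a - b - d) 2 ≠ 0 then (-1 : Int) else 1) := by
    rw [pv_negOnePow_mul _ _ h1 h2, pv_negOnePow_mul _ _ (by omega) h3]
    rw [pv_negOnePow_mod _ (by omega)]
    congr 2
    ring_nf
  calc pyComb ell p * pyComb ellbar p * pyFact p *
        (pyComb (ell - p) a * negOnePow (ell - p - a)) *
        (pyComb (ellbar - p) b * negOnePow (ellbar - p - b)) *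
        (pyComb p d * negOnePow (p - d))
      = (negOnePow (ell - p - a) * negOnePow (ellbar - p - b) * negOnePow (p - d)) *
        (pyComb ell p * pyComb ellbar p * pyFact p * pyComb (ell - p) a *
          pyComb (ellbar - p) b * pyComb p d) := by ring
    _ = _ := by rw [hs]; ring

theorem pv_sum_match (ell ellbar a b d : Int) (hd : 0 ≤ d) (hdm : d ≤ min ell ellbar)
    (ha : 0 ≤ a) (ha2 : a ≤ ell - d) (hb : 0 ≤ b) (hb2 : b ≤ ellbar - d) :
    (((pvUA ell ellbar (min ell ellbar + 1)).filter
        (fun kc => kc.1 == pvKey ell ellbar a b d)).map (·.2)).sum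
      = ((PySem.List.pyRange d (min (min (ell - a) (ellbar - b)) (min ell ellbar) + 1) 1).map
          (fun p => (if PySem.Int.mod (ell + ellbar - p - a - b - d) 2 ≠ 0 then (-1:Int) else 1) *
            pyComb ell p * pyComb ellbar p * pyFact p *
            pyComb (ell - p) a * pyComb (ellbar - p) b * pyComb p d)).sum := by
  rw [pv_sum_filter]
  unfold pvUA
  simp only [List.map_flatMap, List.map_map, pv_sum_flatMap, Function.comp_def,
    beq_iff_eq, pv_key_eq_iff, pv_ite_and3, pv_sum_ite_const, pv_sum_single]
  rw [show PySem.List.pyRange 0 (min ell ellbar + 1) 1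
      = PySem.List.pyRange 0 d 1 ++ PySem.List.pyRange d (min ell ellbar + 1) 1 from
      PySem.List.pyRange_one_append 0 d (min ell ellbar + 1) hd (by omega),
    show PySem.List.pyRange d (min ell ellbar + 1) 1
      = PySem.List.pyRange d (min (min (ell - a) (ellbar - b)) (min ell ellbar) + 1) 1
        ++ PySem.List.pyRange (min (min (ell - a) (ellbar - b)) (min ell ellbar) + 1)
            (min ell ellbar + 1) 1 from
      PySem.List.pyRange_one_append _ _ _ (by omega) (by omega),
    List.map_append, List.map_append, List.sum_append, List.sum_append]
  have hfront : ((PySem.List.pyRange 0 d 1).map (fun p =>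
      if 0 ≤ a ∧ a < ell - p + 1 then
        if 0 ≤ b ∧ b < ellbar - p + 1 then
          if 0 ≤ d ∧ d < p + 1 then pvTerm ell ellbar p a b d else 0
        else 0
      else 0)).sum = 0 := by
    apply List.sum_eq_zero
    intro x hx
    simp only [List.mem_map] at hx
    obtain ⟨p, hp, he⟩ := hx
    have hp' := PySem.List.mem_pyRange_one.mp hp
    rw [← he]
    split_ifs <;> first | rfl | omega
  have hback : ((PySem.List.pyRange (min (min (ell - a) (ellbar - b)) (min ell ellbar) + 1)
      (min ell ellbar + 1) 1).map (fun p =>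
      if 0 ≤ a ∧ a < ell - p + 1 then
        if 0 ≤ b ∧ b < ellbar - p + 1 then
          if 0 ≤ d ∧ d < p + 1 then pvTerm ell ellbar p a b d else 0
        else 0
      else 0)).sum = 0 := by
    apply List.sum_eq_zero
    intro x hx
    simp only [List.mem_map] at hx
    obtain ⟨p, hp, he⟩ := hx
    have hp' := PySem.List.mem_pyRange_one.mp hp
    rw [← he]
    split_ifs <;> first | rfl | omega
  rw [hfront, hback, zero_add, add_zero]
  apply congrArg
  apply List.map_congr_left
  intro p hp
  have hp' := PySem.List.mem_pyRange_one.mp hp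
  rw [if_pos (by omega), if_pos (by omega), if_pos (by omega)]
  exact pv_term_eq ell ellbar p a b d (by omega) (by omega) (by omega)

def pvS (ell ellbar a b d : Int) : Int :=
  (PySem.List.pyRange d (min (min (ell - a) (ellbar - b)) (min ell ellbar) + 1) 1).foldl
    (fun acc p =>
      acc + (if PySem.Int.mod (ell + ellbar - p - a - b - d) 2 ≠ 0 then (-1 : Int) else 1) *
        pyComb ell p * pyComb ellbar p * pyFact p *
        pyComb (ell - p) a * pyComb (ellbar - p) b * pyComb p d) 0

def pvLt (ell ellbar : Int) : List ((Int × Int × Int × Int) × Int) :=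
  (PySem.List.pyRange 0 (min ell ellbar + 1) 1).flatMap (fun d =>
    (PySem.List.pyRange 0 (ell - d + 1) 1).flatMap (fun a =>
      (PySem.List.pyRange 0 (ellbar - d + 1) 1).map (fun b =>
        (pvKey ell ellbar a b d, pvS ell ellbar a b d))))

-- A's dict is the canonical fold over the flattened update list
theorem pv_A_items (ell ellbar : Int) (n : Nat) (hn : ((n:Int)) = min ell ellbar + 1) :
    ((pvUA ell ellbar (min ell ellbar + 1)).foldl
        (fun dict kc => dict.insert kc.1 (dict.getD kc.1 0 + kc.2)) PySem.Dict.empty).items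
      = (pvKeys ell ellbar (min ell ellbar + 1)).map (fun k =>
          (k, (((pvUA ell ellbar (min ell ellbar + 1)).filter
              (fun kc => kc.1 == k)).map (·.2)).sum)) := by
  have hkeys : ((pvUA ell ellbar (min ell ellbar + 1)).foldl
      (fun dict kc => dict.insert kc.1 (dict.getD kc.1 0 + kc.2)) PySem.Dict.empty).keys
      = pvKeys ell ellbar (min ell ellbar + 1) := by
    have h := PySem.Dict.keys_foldl_insert_key (pvUA ell ellbar (min ell ellbar + 1))
      (fun kc => kc.1) (fun d kc => d.getD kc.1 0 + kc.2) PySem.Dict.empty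
    rw [h]
    have := pv_keys_order ell ellbar n
    rw [hn] at this
    simpa [PySem.Set.update_nil_left] using this
  have hnd : ((pvUA ell ellbar (min ell ellbar + 1)).foldl
      (fun dict kc => dict.insert kc.1 (dict.getD kc.1 0 + kc.2)) PySem.Dict.empty).keys.Nodup := by
    rw [hkeys]
    have := pv_keys_order ell ellbar n
    rw [hn] at this
    rw [← this]
    exact PySem.Set.nodup_ofList _
  rw [PySem.Dict.items_eq_map_keys _ hnd 0, hkeys]
  apply List.map_congr_left
  intro k _
  rw [pv_getD_foldIns]
  simp




theorem pv_A_canon (ell ellbar : Int) :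
    expand_psi_to_monomials ell ellbar
      = (pvDropZeros ((pvUA ell ellbar (min ell ellbar + 1)).foldl
          (fun dict kc => dict.insert kc.1 (dict.getD kc.1 0 + kc.2)) PySem.Dict.empty)).items.map
          (fun kv => (kv.1.1, kv.1.2.1, kv.1.2.2.1, kv.1.2.2.2, kv.2)) := by
  unfold expand_psi_to_monomials
  apply congrArg
  apply congrArg
  apply congrArg
  unfold pvUA
  simp only [List.foldl_flatMap, List.foldl_map]
  apply PySem.List.foldl_congr_mem
  intro dict0 p _
  apply PySem.List.foldl_congr_mem
  intro dict1 a _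
  apply PySem.List.foldl_congr_mem
  intro dict2 b _
  apply PySem.List.foldl_congr_mem
  intro dict3 d _
  have hk : (a, b, (ell - p - a) + (ellbar - p - b) + 2 * (p - d), d) = pvKey ell ellbar a b d := by
    simp only [pvKey, Prod.mk.injEq, and_true, true_and]
    ring
  rw [hk]
  rfl

theorem pv_B_canon (ell ellbar : Int) :
    expand_psi_to_monomials_alt ell ellbar
      = ((pvLt ell ellbar).foldl
          (fun acc kv => if kv.2 ≠ 0 then acc.insert kv.1 kv.2 else acc) PySem.Dict.empty).items.map
          (fun kv => (kv.1.1, kv.1.2.1, kv.1.2.2.1, kv.1.2.2.2, kv.2)) := by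
  unfold expand_psi_to_monomials_alt
  apply congrArg
  apply congrArg
  unfold pvLt pvS pvKey
  simp only [List.foldl_flatMap, List.foldl_map]

theorem pv_items_eq (ell ellbar : Int) (n : Nat) (hn : ((n:Int)) = min ell ellbar + 1) :
    ((pvUA ell ellbar (min ell ellbar + 1)).foldl
        (fun dict kc => dict.insert kc.1 (dict.getD kc.1 0 + kc.2)) PySem.Dict.empty).items
      = pvLt ell ellbar := by
  rw [pv_A_items ell ellbar n hn]
  unfold pvKeys pvLt
  simp only [List.map_flatMap, List.map_map, Function.comp_def]
  apply pv_flatMap_congr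
  intro d hd
  apply pv_flatMap_congr
  intro a ha
  apply List.map_congr_left
  intro b hb
  have hd' := PySem.List.mem_pyRange_one.mp hd
  have ha' := PySem.List.mem_pyRange_one.mp ha
  have hb' := PySem.List.mem_pyRange_one.mp hb
  have hS : pvS ell ellbar a b d
      = ((PySem.List.pyRange d (min (min (ell - a) (ellbar - b)) (min ell ellbar) + 1) 1).map
          (fun p => (if PySem.Int.mod (ell + ellbar - p - a - b - d) 2 ≠ 0 then (-1:Int) else 1) *
            pyComb ell p * pyComb ellbar p * pyFact p *
            pyComb (ell - p) a * pyComb (ellbar - p) b * pyComb p d)).sum := by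
    unfold pvS
    rw [PySem.List.foldl_add]
    exact zero_add _
  rw [pv_sum_match ell ellbar a b d hd'.1 (by omega) ha'.1 (by omega) hb'.1 (by omega), ← hS]

theorem pv_expand_eq (ell ellbar : Int) :
    expand_psi_to_monomials ell ellbar = expand_psi_to_monomials_alt ell ellbar := by
  by_cases hmin : 0 ≤ min ell ellbar
  · have hn : (((min ell ellbar + 1).toNat : Nat) : Int) = min ell ellbar + 1 := by omega
    rw [pv_A_canon, pv_B_canon]
    apply congrArg
    have hndA : (((pvUA ell ellbar (min ell ellbar + 1)).foldl
        (fun dict kc => dict.insert kc.1 (dict.getD kc.1 0 + kc.2)) PySem.Dict.empty).items.map (·.1)).Nodup := by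
      rw [pv_items_eq ell ellbar _ hn]
      have h1 : (pvLt ell ellbar).map (·.1) = pvKeys ell ellbar (min ell ellbar + 1) := by
        unfold pvLt pvKeys
        simp [List.map_flatMap, List.map_map, Function.comp_def]
      rw [h1]
      have := pv_keys_order ell ellbar (min ell ellbar + 1).toNat
      rw [hn] at this
      rw [← this]
      exact PySem.Set.nodup_ofList _
    have hA : (pvDropZeros ((pvUA ell ellbar (min ell ellbar + 1)).foldl
        (fun dict kc => dict.insert kc.1 (dict.getD kc.1 0 + kc.2)) PySem.Dict.empty)).items
        = ((pvUA ell ellbar (min ell ellbar + 1)).foldl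
            (fun dict kc => dict.insert kc.1 (dict.getD kc.1 0 + kc.2)) PySem.Dict.empty).items.filter
            (fun kc => decide (kc.2 ≠ 0)) := by
      unfold pvDropZeros
      rw [pv_items_foldIf _ _ hndA (fun kc _ => PySem.Dict.contains_empty _),
        show (PySem.Dict.empty : PySem.Dict (Int × Int × Int × Int) Int).items = [] from rfl,
        List.nil_append]
    have hndB : ((pvLt ell ellbar).map (·.1)).Nodup := by
      rw [← pv_items_eq ell ellbar _ hn]
      exact hndA
    have hB : ((pvLt ell ellbar).foldl
        (fun acc kv => if kv.2 ≠ 0 then acc.insert kv.1 kv.2 else acc) PySem.Dict.empty).items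
        = (pvLt ell ellbar).filter (fun kc => decide (kc.2 ≠ 0)) := by
      rw [pv_items_foldIf _ _ hndB (fun kc _ => PySem.Dict.contains_empty _),
        show (PySem.Dict.empty : PySem.Dict (Int × Int × Int × Int) Int).items = [] from rfl,
        List.nil_append]
    rw [hA, hB, pv_items_eq ell ellbar _ hn]
  · unfold expand_psi_to_monomials expand_psi_to_monomials_alt pvDropZeros
    simp [PySem.List.pyRange_one_eq_nil (show min ell ellbar + 1 ≤ (0:Int) by omega),
      show (PySem.Dict.empty : PySem.Dict (Int × Int × Int × Int) Int).items = [] from rfl]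

-- ===== VERDICT (by name: the statement is the Claim_ definition above) =====
theorem expand_psi_to_monomials_spec : Claim_equal_expand_psi_to_monomials := by
  intro ell ellbar _
  unfold Spec_expand_psi_to_monomials
  exact pv_expand_eq ell ellbar
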